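-- pv_equiv track=rewrite | github.com/morgoth1145/advent-of-code | 2020/Day 16/solution.py | determine_rule_order
-- ===== SOURCE A (Python) =====
-- def determine_rule_order(available, rule_order_candidates):
--     if 0 == len(rule_order_candidates):
--         return []
--
--     candidates = rule_order_candidates[0]
--     rest = rule_order_candidates[1:]
--
--     for name in candidates:
--         if name in available:
--             answer = determine_rule_order(available - {name}, rest)
--             if answer is not None:
--                 return [name] + answer
-- ===== SOURCE B (Python) =====
-- def determine_rule_order(available, rule_order_candidates):
--     # Iterative DFS with an explicit stack of frames (row index, available set,
--     # partial answer, name chosen at the parent).  The chosen name is applied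
--     # lazily at pop time, so sibling frames share one set/list; never mutates
--     # the caller's arguments.
--     rows = rule_order_candidates
--     n = len(rows)
--     stack = [(0, available, [], None)]
--     while stack:
--         i, avail, answer, name = stack.pop()
--         if name is not None:
--             avail = avail - {name}
--             answer = answer + [name]
--         if i == n:
--             return answer
--         # push in reverse so the first candidate is explored first (DFS order)
--         for cand in reversed(list(rows[i])):
--             if cand in avail:
--                 stack.append((i + 1, avail, answer, cand))
--     return None
-- ===== Notes on version B (the rewrite author's own statement) =====
-- stated objective: alternative
-- what changed: Replaced the recursive backtracking (implicit call-stack, early-return for loop) by an iterative depth-first search over an explicit stack of (row index, available set, partial answer) frames, pushed in reverse candidate order so the same first solution is found.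
import Mathlib
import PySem

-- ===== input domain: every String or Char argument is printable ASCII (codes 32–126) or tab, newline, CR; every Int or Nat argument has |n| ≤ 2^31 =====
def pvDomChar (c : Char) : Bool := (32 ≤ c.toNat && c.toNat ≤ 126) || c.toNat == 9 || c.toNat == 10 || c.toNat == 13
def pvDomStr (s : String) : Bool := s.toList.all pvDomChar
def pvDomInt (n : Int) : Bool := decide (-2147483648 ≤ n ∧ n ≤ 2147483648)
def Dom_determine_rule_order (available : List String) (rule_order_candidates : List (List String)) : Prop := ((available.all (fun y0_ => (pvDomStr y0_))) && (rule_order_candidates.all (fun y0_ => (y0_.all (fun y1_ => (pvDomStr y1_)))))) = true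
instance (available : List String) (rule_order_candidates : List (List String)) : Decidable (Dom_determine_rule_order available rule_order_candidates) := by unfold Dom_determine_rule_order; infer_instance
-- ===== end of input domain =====

-- B replaces A's recursive backtracking by an iterative DFS over an explicit stack of
-- (row index, available set, partial answer) frames; same result, similar cost (alternative).


-- ===== PORT A =====
-- Literal port of A: recursion over the rows; droTry is the 'for name in candidates'
-- loop with its early return. 'name in available' = Set.contains, 'available - {name}' = Set.diff.
mutual
def determine_rule_order (available : List String) (rule_order_candidates : List (List String)) : Option (List String) :=
  match rule_order_candidates with
  | [] => some []
  | candidates :: rest => droTry available candidates rest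
termination_by (rule_order_candidates.length, 1, 0)
def droTry (available : List String) (names : List String) (rest : List (List String)) : Option (List String) :=
  match names with
  | [] => none
  | name :: more =>
    if PySem.Set.contains available name then
      match determine_rule_order (PySem.Set.diff available [name]) rest with
      | some answer => some (name :: answer)
      | none => droTry available more rest
    else droTry available more rest
termination_by (rest.length + 1, 0, names.length)
end

-- ===== PORT B =====
-- The stack's top is the list head.  The python 'for cand in reversed(list(rows[i])):
-- stack.append(...)' leaves the frames of rows[i]'s valid names on top, in candidate
-- order; with head-as-top that is exactly 'frames-in-candidate-order ++ rest'.
-- droResolve is the lazy pop-time 'if name is not None: avail = avail - {name}; answer = answer + [name]'.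
def droResolve (avail ans : List String) (nameOpt : Option String) : List String × List String :=
  match nameOpt with
  | none => (avail, ans)
  | some name => (PySem.Set.diff avail [name], ans ++ [name])

def droWeight (rows : List (List String)) (i : Nat) : Nat :=
  (rows.flatten.length + 1) ^ (rows.length - i)

def droMeasure (rows : List (List String)) (stack : List (Nat × List String × List String × Option String)) : Nat :=
  (stack.map (fun f => droWeight rows f.1)).sum

theorem droGetD_le_flatten (rows : List (List String)) (i : Nat) :
    (rows.getD i []).length <= rows.flatten.length := by
  induction rows generalizing i with
  | nil => simp [List.getD]
  | cons c rest ih =>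
    cases i with
    | zero => simp
    | succ j => have := ih j; simp at this ⊢; omega

theorem droSum_map_const {α : Type} (l : List α) (k : Nat) :
    (l.map (fun _ => k)).sum = l.length * k := by
  induction l with
  | nil => simp
  | cons a l ih => simp only [List.map_cons, List.sum_cons, ih, List.length_cons]; ring

theorem droMeasure_dec (rows : List (List String)) (i : Nat) (avail ans : List String)
    (rest : List (Nat × List String × List String × Option String)) (nameOpt : Option String) :
    droMeasure rows
      (((rows.getD i []).filter (fun name => PySem.Set.contains avail name)).map
        (fun name => (i + 1, avail, ans, some name)) ++ rest)
      < droMeasure rows ((i, avail, ans, nameOpt) :: rest) := by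
  have hW : 0 < rows.flatten.length + 1 := Nat.succ_pos _
  simp only [droMeasure, List.map_append, List.sum_append, List.map_cons, List.sum_cons,
    List.map_map]
  have hsum : ((((rows.getD i []).filter (fun name => PySem.Set.contains avail name)).map
      ((fun f => droWeight rows f.1) ∘
        (fun name => (i + 1, avail, ans, some name)))).sum)
      = ((rows.getD i []).filter (fun name => PySem.Set.contains avail name)).length
        * droWeight rows (i + 1) := by
    have hc : ((fun (f : Nat × List String × List String × Option String) => droWeight rows f.1) ∘
        (fun name => (i + 1, avail, ans, some name)))
        = fun (_ : String) => droWeight rows (i + 1) := rfl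
    rw [hc, droSum_map_const]
  rw [hsum]
  rcases Nat.lt_or_ge i rows.length with hlt | hge
  · have hlen : ((rows.getD i []).filter (fun name => PySem.Set.contains avail name)).length
        ≤ rows.flatten.length :=
      Nat.le_trans (List.length_filter_le _ _) (droGetD_le_flatten rows i)
    have hpow : droWeight rows i = (rows.flatten.length + 1) * droWeight rows (i + 1) := by
      unfold droWeight
      have h1 : rows.length - i = (rows.length - (i + 1)) + 1 := by omega
      rw [h1, pow_succ]; ring
    have hposW : 0 < droWeight rows (i + 1) := pow_pos hW _
    have hmul : ((rows.getD i []).filter (fun name => PySem.Set.contains avail name)).length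
        * droWeight rows (i + 1) < (rows.flatten.length + 1) * droWeight rows (i + 1) :=
      Nat.mul_lt_mul_of_lt_of_le (Nat.lt_succ_of_le hlen) (Nat.le_refl _) hposW
    omega
  · have hnil : rows.getD i [] = [] :=
      List.getD_eq_default _ _ (by omega)
    rw [hnil]
    have : 0 < droWeight rows i := pow_pos hW _
    simp; omega

def droAltLoop (rows : List (List String)) :
    List (Nat × List String × List String × Option String) → Option (List String)
  | [] => none
  | (i, avail, ans, nameOpt) :: rest =>
    let r := droResolve avail ans nameOpt
    if i = rows.length then some r.2
    else droAltLoop rows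
      (((rows.getD i []).filter (fun cand => PySem.Set.contains r.1 cand)).map
        (fun cand => (i + 1, r.1, r.2, some cand)) ++ rest)
termination_by stack => droMeasure rows stack
decreasing_by exact droMeasure_dec rows i r.1 r.2 rest nameOpt

def determine_rule_order_alt (available : List String) (rule_order_candidates : List (List String)) : Option (List String) :=
  droAltLoop rule_order_candidates [(0, available, [], none)]

-- ===== PRECONDITION & SPEC =====
def Spec_determine_rule_order (available : List String) (rule_order_candidates : List (List String)) (out : Option (List String)) : Prop := out = determine_rule_order_alt available rule_order_candidates
instance (available : List String) (rule_order_candidates : List (List String)) (out : Option (List String)) : Decidable (Spec_determine_rule_order available rule_order_candidates out) := by unfold Spec_determine_rule_order; infer_instance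

-- ===== CLAIM (what is proved, stated in full; the proofs are below) =====
def Claim_equal_determine_rule_order : Prop := ∀ (available : List String) (rule_order_candidates : List (List String)), Dom_determine_rule_order available rule_order_candidates → Spec_determine_rule_order available rule_order_candidates (determine_rule_order available rule_order_candidates)

-- ===== LEMMAS AND PROOFS =====

-- value a single frame contributes: A's answer for the remaining rows, prefixed by ans
def droFrameRes (rows : List (List String)) (f : Nat × List String × List String × Option String) :
    Option (List String) :=
  (determine_rule_order (droResolve f.2.1 f.2.2.1 f.2.2.2).1 (rows.drop f.1)).map
    (fun t => (droResolve f.2.1 f.2.2.1 f.2.2.2).2 ++ t)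

theorem droPushes_findSome (rows : List (List String)) (i : Nat)
    (avail ans : List String) (c : List String) :
    ((c.filter (fun name => PySem.Set.contains avail name)).map
        (fun name => (i + 1, avail, ans, some name))).findSome?
      (droFrameRes rows)
    = (droTry avail c (rows.drop (i + 1))).map (fun t => ans ++ t) := by
  induction c with
  | nil => simp [droTry]
  | cons name more ih =>
    have hfr : droFrameRes rows (i + 1, avail, ans, some name)
        = (determine_rule_order (PySem.Set.diff avail [name]) (rows.drop (i + 1))).map
            (fun t => (ans ++ [name]) ++ t) := rfl
    by_cases h : PySem.Set.contains avail name
    · rw [List.filter_cons_of_pos h, List.map_cons, List.findSome?_cons, hfr]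
      rw [droTry]
      rw [if_pos h]
      cases hres : determine_rule_order (PySem.Set.diff avail [name]) (rows.drop (i + 1)) with
      | none => simpa only [Option.map_none] using ih
      | some t => simp [List.append_assoc]
    · rw [List.filter_cons_of_neg h]
      rw [droTry]
      rw [if_neg h]
      exact ih

theorem droAltLoop_eq_findSome (rows : List (List String)) :
    ∀ (N : Nat) (stack : List (Nat × List String × List String × Option String)),
      droMeasure rows stack ≤ N → (∀ f ∈ stack, f.1 ≤ rows.length) →
      droAltLoop rows stack = stack.findSome? (droFrameRes rows) := by
  intro N
  induction N with
  | zero =>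
    intro stack hm _
    cases stack with
    | nil => simp [droAltLoop]
    | cons f rest =>
      exfalso
      have : 0 < droMeasure rows (f :: rest) := by
        have : 0 < droWeight rows f.1 := pow_pos (Nat.succ_pos _) _
        simp [droMeasure]; omega
      omega
  | succ N ih =>
    intro stack hm hbound
    cases stack with
    | nil => simp [droAltLoop]
    | cons f rest =>
      obtain ⟨i, avail0, ans0, nameOpt⟩ := f
      by_cases hi : i = rows.length
      · subst hi
        rw [droAltLoop]
        simp [droFrameRes, determine_rule_order]
      · have hlt : i < rows.length := by
          have := hbound (i, avail0, ans0, nameOpt) List.mem_cons_self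
          simp at this; omega
        rw [droAltLoop]
        set r := droResolve avail0 ans0 nameOpt with hr
        simp only [if_neg hi]
        have hdec := droMeasure_dec rows i r.1 r.2 rest nameOpt
        have hmm : droMeasure rows ((i, r.1, r.2, nameOpt) :: rest)
            = droMeasure rows ((i, avail0, ans0, nameOpt) :: rest) := rfl
        have hb : ∀ f ∈ (((rows.getD i []).filter (fun cand => PySem.Set.contains r.1 cand)).map
            (fun cand => (i + 1, r.1, r.2, some cand)) ++ rest),
            f.1 ≤ rows.length := by
          intro f hf
          rcases List.mem_append.mp hf with h | h
          · obtain ⟨name, _, rfl⟩ := List.mem_map.mp h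
            simpa using hlt
          · exact hbound f (List.mem_cons_of_mem _ h)
        rw [ih _ (by omega) hb]
        rw [List.findSome?_append]
        rw [droPushes_findSome]
        rw [List.findSome?_cons]
        have hrow : rows.getD i [] = rows[i] := List.getD_eq_getElem rows [] hlt
        have hdrop : rows.drop i = rows[i] :: rows.drop (i + 1) :=
          List.drop_eq_getElem_cons hlt
        have hfr2 : droFrameRes rows (i, avail0, ans0, nameOpt)
            = (droTry r.1 (rows.getD i []) (rows.drop (i + 1))).map (fun t => r.2 ++ t) := by
          simp only [droFrameRes, hdrop, hrow, ← hr]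
          rw [determine_rule_order]
        rw [hfr2]
        cases droTry r.1 (rows.getD i []) (rows.drop (i + 1)) <;> simp

-- ===== VERDICT (by name: the statement is the Claim_ definition above) =====
theorem determine_rule_order_spec : Claim_equal_determine_rule_order := by
  intro available rows _
  unfold Spec_determine_rule_order determine_rule_order_alt
  rw [droAltLoop_eq_findSome rows (droMeasure rows [(0, available, [], none)])
      [(0, available, [], none)] (Nat.le_refl _) (by intro f hf; simp at hf; simp [hf])]
  simp [droFrameRes, droResolve]
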